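-- pv_equiv track=rewrite | github.com/Okekeprince1/Robinhood-OA | CountOccurrences.py | threeByN
-- ===== SOURCE A (Python) =====
-- from collections import defaultdict
--
-- def threeByN(matrix):
--
--     d = defaultdict(set)
--     n = len(matrix[0])
--     for i in range(3):
--         for j in range(3):
--             pos = 0
--             k = j
--             while k < (n) and pos < (n - 2):
--                 d[pos].add(matrix[i][k])
--                 pos += 1
--                 k += 1
--     table = [True] * (n - 2)
--     for key, value in d.items():
--         if len(value) != 9:
--             table[key] = False
--     return table
-- ===== SOURCE B (Python) =====
-- def threeByN(matrix):
--     n = len(matrix[0])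
--     if n < 3:
--         return []
--     cnt = {}
--     distinct = 0
--
--     def bump(v):
--         nonlocal distinct
--         cnt[v] = cnt.get(v, 0) + 1
--         if cnt[v] == 1:
--             distinct += 1
--
--     def drop(v):
--         nonlocal distinct
--         cnt[v] = cnt.get(v, 0) - 1
--         if cnt[v] == 0:
--             distinct -= 1
--
--     for i in range(3):
--         for j in range(3):
--             bump(matrix[i][j])
--     res = [distinct == 9]
--     for pos in range(1, n - 2):
--         for i in range(3):
--             bump(matrix[i][pos + 2])
--         for i in range(3):
--             drop(matrix[i][pos - 1])
--         res.append(distinct == 9)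
--     return res
-- ===== Notes on version B (the rewrite author's own statement) =====
-- stated objective: alternative
-- what changed: Replaces A's dict-of-sets built by nine full sweeps over all window positions (plus a patch pass over a True table) with a single sliding-window pass that maintains one value->count dict and a running number of distinct values, doing 6 counter updates per slide instead of 9 set insertions per window.
import Mathlib
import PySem

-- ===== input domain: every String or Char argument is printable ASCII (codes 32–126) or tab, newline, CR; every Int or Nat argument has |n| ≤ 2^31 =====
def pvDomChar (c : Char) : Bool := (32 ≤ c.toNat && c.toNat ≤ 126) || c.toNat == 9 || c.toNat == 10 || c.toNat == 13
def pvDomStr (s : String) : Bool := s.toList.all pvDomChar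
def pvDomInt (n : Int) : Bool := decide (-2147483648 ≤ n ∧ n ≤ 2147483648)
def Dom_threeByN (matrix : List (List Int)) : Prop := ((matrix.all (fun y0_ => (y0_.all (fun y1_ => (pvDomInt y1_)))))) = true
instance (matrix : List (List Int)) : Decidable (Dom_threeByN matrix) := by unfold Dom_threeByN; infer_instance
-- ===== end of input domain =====

-- B replaces A's nine full sweeps into a dict-of-sets (plus a table patch pass) by one sliding-window
-- pass maintaining a value->count dict and a running count of distinct values (objective: alternative).


-- matrix[i][k]; exact under Pre_ (indices in range there)
def mGet (matrix : List (List Int)) (i k : Int) : Int :=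
  PySem.List.pyGetD (PySem.List.pyGetD matrix i []) k 0

-- ===== PORT A =====
-- the inner 'while k < n and pos < n-2' loop; fuel (n-2).toNat bounds the iterations (pos < n-2, pos += 1)
def aWhile (matrix : List (List Int)) (n i j : Int) :
    Nat → Int → Int → PySem.Dict Int (PySem.Set Int) → PySem.Dict Int (PySem.Set Int)
  | 0, _, _, d => d
  | fuel+1, pos, k, d =>
    if k < n ∧ pos < n - 2 then
      aWhile matrix n i j fuel (pos+1) (k+1)
        (d.modify pos [] (fun s => PySem.Set.add s (mGet matrix i k)))
    else d

def threeByN (matrix : List (List Int)) : List Bool :=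
  let n : Int := ((PySem.List.pyGetD matrix 0 []).length : Int)
  let d := (PySem.List.pyRange 0 3 1).foldl (fun d i =>
      (PySem.List.pyRange 0 3 1).foldl (fun d j => aWhile matrix n i j (n-2).toNat 0 j d) d)
    PySem.Dict.empty
  let table := List.replicate (n-2).toNat true
  d.items.foldl (fun table kv =>
      if kv.2.length ≠ 9 then PySem.List.pySetD table kv.1 false else table) table

-- ===== PORT B =====
-- bump(v): cnt[v] = cnt.get(v, 0) + 1; if cnt[v] == 1: distinct += 1
def bAdd (st : PySem.Dict Int Int × Int) (v : Int) : PySem.Dict Int Int × Int :=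
  let cnt := st.1.modify v 0 (· + 1)
  (cnt, if cnt.getD v 0 == 1 then st.2 + 1 else st.2)

-- drop(v): cnt[v] = cnt.get(v, 0) - 1; if cnt[v] == 0: distinct -= 1
def bDel (st : PySem.Dict Int Int × Int) (v : Int) : PySem.Dict Int Int × Int :=
  let cnt := st.1.modify v 0 (· - 1)
  (cnt, if cnt.getD v 0 == 0 then st.2 - 1 else st.2)

def threeByN_alt (matrix : List (List Int)) : List Bool :=
  let n : Int := ((PySem.List.pyGetD matrix 0 []).length : Int)
  if n < 3 then []
  else
    let st0 := (PySem.List.pyRange 0 3 1).foldl (fun st i =>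
        (PySem.List.pyRange 0 3 1).foldl (fun st j => bAdd st (mGet matrix i j)) st)
      (PySem.Dict.empty, 0)
    let fin := (PySem.List.pyRange 1 (n-2) 1).foldl (fun st pos =>
        let st1 := (PySem.List.pyRange 0 3 1).foldl (fun s i => bAdd s (mGet matrix i (pos+2))) (st.1, st.2.1)
        let st2 := (PySem.List.pyRange 0 3 1).foldl (fun s i => bDel s (mGet matrix i (pos-1))) st1
        (st2.1, st2.2, st.2.2 ++ [decide (st2.2 = 9)]))
      (st0.1, st0.2, [decide (st0.2 = 9)])
    fin.2.2

-- ===== PRECONDITION & SPEC =====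
-- Pre_ = exactly the inputs where Python A returns: matrix nonempty, and when the first row has
-- ≥ 3 columns (so the sweeps run), at least 3 rows each at least as long as row 0.
def Pre_threeByN (matrix : List (List Int)) : Prop :=
  matrix ≠ [] ∧
  (3 ≤ (matrix.headD []).length →
    3 ≤ matrix.length ∧ ∀ r ∈ matrix.take 3, (matrix.headD []).length ≤ r.length)
instance (matrix : List (List Int)) : Decidable (Pre_threeByN matrix) := by
  unfold Pre_threeByN; infer_instance

def pvWitness_threeByN : List (List Int) := [[1,2,3,4],[4,5,6,7],[7,8,9,1]]

def Spec_threeByN (matrix : List (List Int)) (out : List Bool) : Prop := out = threeByN_alt matrix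
instance (matrix : List (List Int)) (out : List Bool) : Decidable (Spec_threeByN matrix out) := by
  unfold Spec_threeByN; infer_instance

-- ===== CLAIM (what is proved, stated in full; the proofs are below) =====
def Claim_equal_threeByN : Prop := ∀ (matrix : List (List Int)), Dom_threeByN matrix → Pre_threeByN matrix → Spec_threeByN matrix (threeByN matrix)

-- ===== LEMMAS AND PROOFS =====
def CInv (μ : Multiset Int) (st : PySem.Dict Int Int × Int) : Prop :=
  (∀ v : Int, st.1.getD v 0 = (μ.count v : Int)) ∧ st.2 = (μ.toFinset.card : Int)

theorem bAdd_inv (μ : Multiset Int) (st : PySem.Dict Int Int × Int) (v : Int)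
    (h : CInv μ st) : CInv (v ::ₘ μ) (bAdd st v) := by
  obtain ⟨hc, hd⟩ := h
  constructor
  · intro u
    simp only [bAdd, PySem.Dict.getD_modify]
    by_cases hu : u = v
    · subst hu; simp [hc u]
    · simp [hu, hc u]
  · simp only [bAdd, PySem.Dict.getD_modify_self, hc v, hd, Multiset.toFinset_cons]
    by_cases hv : v ∈ μ
    · have h1 : (1:Int) ≤ (μ.count v : Int) := by
        exact_mod_cast Multiset.one_le_count_iff_mem.mpr hv
      have : ((μ.count v : Int) + 1 == 1) = false := by
        simp; omega
      simp [this, Finset.insert_eq_self.mpr (Multiset.mem_toFinset.mpr hv)]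
    · have h0 : μ.count v = 0 := Multiset.count_eq_zero.mpr hv
      rw [Finset.card_insert_of_notMem (by simp [Multiset.mem_toFinset, hv])]
      simp [h0]

theorem bDel_inv (μ : Multiset Int) (st : PySem.Dict Int Int × Int) (v : Int)
    (hv : v ∈ μ) (h : CInv μ st) : CInv (μ.erase v) (bDel st v) := by
  obtain ⟨hc, hd⟩ := h
  have h1 : 1 ≤ μ.count v := Multiset.one_le_count_iff_mem.mpr hv
  constructor
  · intro u
    simp only [bDel, PySem.Dict.getD_modify]
    by_cases hu : u = v
    · subst hu
      rw [if_pos rfl, hc u, Multiset.count_erase_self]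
      omega
    · rw [if_neg hu, hc u, Multiset.count_erase_of_ne hu]
  · simp only [bDel, PySem.Dict.getD_modify_self, hc v, hd]
    by_cases hone : μ.count v = 1
    · have hcond : ((μ.count v : Int) - 1 == 0) = true := by simp [hone]
      rw [hcond, if_pos rfl]
      have hfe : (μ.erase v).toFinset = μ.toFinset.erase v := by
        ext u
        simp only [Multiset.mem_toFinset, Finset.mem_erase]
        constructor
        · intro hu
          by_cases huv : u = v
          · subst huv
            exfalso
            have := Multiset.count_erase_self u μ
            have : μ.count u - 1 > 0 := by
              have := Multiset.one_le_count_iff_mem.mpr hu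
              omega
            omega
          · exact ⟨huv, (Multiset.mem_erase_of_ne huv).mp hu⟩
        · intro ⟨huv, hu⟩
          have : (μ.erase v).count u = μ.count u := Multiset.count_erase_of_ne huv μ
          have : 1 ≤ (μ.erase v).count u := by
            rw [this]; exact Multiset.one_le_count_iff_mem.mpr hu
          exact Multiset.one_le_count_iff_mem.mp this
      rw [hfe, Finset.card_erase_of_mem (Multiset.mem_toFinset.mpr hv)]
      have : 1 ≤ μ.toFinset.card := Finset.card_pos.mpr ⟨v, Multiset.mem_toFinset.mpr hv⟩
      push_cast [Nat.cast_sub this]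
      ring
    · have hcond : ((μ.count v : Int) - 1 == 0) = false := by
        simp; omega
      rw [hcond, if_neg (by simp)]
      have hte : (μ.erase v).toFinset = μ.toFinset := by
        ext u
        rw [Multiset.mem_toFinset, Multiset.mem_toFinset]
        constructor
        · intro hu; exact Multiset.mem_of_mem_erase hu
        · intro hu
          by_cases huv : u = v
          · subst huv
            have h2 : 1 ≤ (μ.erase u).count u := by
              rw [Multiset.count_erase_self]; omega
            exact Multiset.one_le_count_iff_mem.mp h2
          · exact (Multiset.mem_erase_of_ne huv).mpr hu
      rw [hte]

def colM (matrix : List (List Int)) (p : Int) : Multiset Int :=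
  {mGet matrix 0 p} + {mGet matrix 1 p} + {mGet matrix 2 p}

def wM (matrix : List (List Int)) (p : Int) : Multiset Int :=
  colM matrix p + colM matrix (p+1) + colM matrix (p+2)

theorem range3 : PySem.List.pyRange 0 3 1 = [0, 1, 2] := by decide

theorem slide (matrix : List (List Int)) (q : Int) (st : PySem.Dict Int Int × Int)
    (h : CInv (wM matrix q) st) :
    CInv (wM matrix (q+1))
      ((PySem.List.pyRange 0 3 1).foldl (fun s i => bDel s (mGet matrix i q))
        ((PySem.List.pyRange 0 3 1).foldl (fun s i => bAdd s (mGet matrix i (q+3))) st)) := by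
  rw [range3]
  simp only [List.foldl_cons, List.foldl_nil]
  have h1 := bAdd_inv _ _ (mGet matrix 0 (q+3)) h
  have h2 := bAdd_inv _ _ (mGet matrix 1 (q+3)) h1
  have h3 := bAdd_inv _ _ (mGet matrix 2 (q+3)) h2
  have hEq : (mGet matrix 2 (q+3) ::ₘ mGet matrix 1 (q+3) ::ₘ mGet matrix 0 (q+3) ::ₘ wM matrix q)
      = mGet matrix 0 q ::ₘ mGet matrix 1 q ::ₘ mGet matrix 2 q ::ₘ wM matrix (q+1) := by
    have e1 : q + 1 + 1 = q + 2 := by ring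
    have e2 : q + 1 + 2 = q + 3 := by ring
    simp only [wM, colM, e1, e2, ← Multiset.singleton_add]
    abel
  rw [hEq] at h3
  have h4 := bDel_inv _ _ (mGet matrix 0 q) (Multiset.mem_cons_self _ _) h3
  rw [Multiset.erase_cons_head] at h4
  have h5 := bDel_inv _ _ (mGet matrix 1 q) (Multiset.mem_cons_self _ _) h4
  rw [Multiset.erase_cons_head] at h5
  have h6 := bDel_inv _ _ (mGet matrix 2 q) (Multiset.mem_cons_self _ _) h5
  rw [Multiset.erase_cons_head] at h6
  exact h6

theorem initInv (matrix : List (List Int)) :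
    CInv (wM matrix 0)
      ((PySem.List.pyRange 0 3 1).foldl (fun st i =>
          (PySem.List.pyRange 0 3 1).foldl (fun st j => bAdd st (mGet matrix i j)) st)
        (PySem.Dict.empty, 0)) := by
  rw [range3]
  simp only [List.foldl_cons, List.foldl_nil]
  have h0 : CInv 0 ((PySem.Dict.empty : PySem.Dict Int Int), (0 : Int)) := by
    constructor
    · intro v; simp [PySem.Dict.getD_empty]
    · simp
  have h1 := bAdd_inv _ _ (mGet matrix 0 0) h0
  have h2 := bAdd_inv _ _ (mGet matrix 0 1) h1
  have h3 := bAdd_inv _ _ (mGet matrix 0 2) h2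
  have h4 := bAdd_inv _ _ (mGet matrix 1 0) h3
  have h5 := bAdd_inv _ _ (mGet matrix 1 1) h4
  have h6 := bAdd_inv _ _ (mGet matrix 1 2) h5
  have h7 := bAdd_inv _ _ (mGet matrix 2 0) h6
  have h8 := bAdd_inv _ _ (mGet matrix 2 1) h7
  have h9 := bAdd_inv _ _ (mGet matrix 2 2) h8
  have hEq : (mGet matrix 2 2 ::ₘ mGet matrix 2 1 ::ₘ mGet matrix 2 0 ::ₘ mGet matrix 1 2 ::ₘ
      mGet matrix 1 1 ::ₘ mGet matrix 1 0 ::ₘ mGet matrix 0 2 ::ₘ mGet matrix 0 1 ::ₘ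
      mGet matrix 0 0 ::ₘ (0 : Multiset Int)) = wM matrix 0 := by
    have e1 : (0:Int) + 1 = 1 := by ring
    have e2 : (0:Int) + 2 = 2 := by ring
    simp only [wM, colM, e1, e2, ← Multiset.singleton_add]
    abel
  rw [hEq] at h9
  exact h9

def ostep (matrix : List (List Int)) (st : PySem.Dict Int Int × Int × List Bool) (pos : Int) :
    PySem.Dict Int Int × Int × List Bool :=
  let st1 := (PySem.List.pyRange 0 3 1).foldl (fun s i => bAdd s (mGet matrix i (pos+2))) (st.1, st.2.1)
  let st2 := (PySem.List.pyRange 0 3 1).foldl (fun s i => bDel s (mGet matrix i (pos-1))) st1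
  (st2.1, st2.2, st.2.2 ++ [decide (st2.2 = 9)])

theorem cast_dec9 (a : Nat) : (decide ((a : Int) = 9)) = decide (a = 9) := decide_eq_decide.mpr (by omega)

theorem ostep_inv (matrix : List (List Int)) (q : Int) (st : PySem.Dict Int Int × Int × List Bool)
    (h : CInv (wM matrix q) (st.1, st.2.1)) :
    CInv (wM matrix (q+1)) ((ostep matrix st (q+1)).1, (ostep matrix st (q+1)).2.1) ∧
    (ostep matrix st (q+1)).2.2 = st.2.2 ++ [decide ((wM matrix (q+1)).toFinset.card = 9)] := by
  have e1 : q + 1 + 2 = q + 3 := by ring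
  have e2 : q + 1 - 1 = q := by ring
  have hs := slide matrix q (st.1, st.2.1) h
  simp only [ostep, e1, e2]
  set st2 := (PySem.List.pyRange 0 3 1).foldl (fun s i => bDel s (mGet matrix i q))
    ((PySem.List.pyRange 0 3 1).foldl (fun s i => bAdd s (mGet matrix i (q+3))) (st.1, st.2.1)) with hst2
  refine ⟨⟨hs.1, hs.2⟩, ?_⟩
  rw [hs.2, cast_dec9]

theorem outerB (matrix : List (List Int)) (m : Nat) (cnt0 : PySem.Dict Int Int) (dis0 : Int)
    (res0 : List Bool) (h : CInv (wM matrix 0) (cnt0, dis0)) :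
    CInv (wM matrix (m : Int))
        (((PySem.List.pyRange 1 (1+(m:Int)) 1).foldl (ostep matrix) (cnt0, dis0, res0)).1,
         ((PySem.List.pyRange 1 (1+(m:Int)) 1).foldl (ostep matrix) (cnt0, dis0, res0)).2.1) ∧
      ((PySem.List.pyRange 1 (1+(m:Int)) 1).foldl (ostep matrix) (cnt0, dis0, res0)).2.2
        = res0 ++ (List.range m).map
            (fun t : Nat => decide ((wM matrix ((t:Int)+1)).toFinset.card = 9)) := by
  induction m with
  | zero =>
    rw [PySem.List.pyRange_one_eq_nil (by omega)]
    simpa using h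
  | succ k ih =>
    have hsplit : PySem.List.pyRange 1 (1+((k+1:Nat):Int)) 1
        = PySem.List.pyRange 1 (1+(k:Int)) 1 ++ [1+(k:Int)] := by
      have : (1+((k+1:Nat):Int)) = (1+(k:Int)) + 1 := by push_cast; ring
      rw [this, PySem.List.pyRange_one_succ_right (by omega)]
    rw [hsplit, List.foldl_append]
    simp only [List.foldl_cons, List.foldl_nil]
    set F := (PySem.List.pyRange 1 (1+(k:Int)) 1).foldl (ostep matrix) (cnt0, dis0, res0) with hF
    have e : (1:Int) + (k:Int) = (k:Int) + 1 := by ring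
    rw [e]
    have hstep := ostep_inv matrix (k:Int) F ih.1
    have ecast : (((k+1:Nat)):Int) = (k:Int) + 1 := by push_cast; ring
    rw [ecast]
    refine ⟨hstep.1, ?_⟩
    rw [hstep.2, ih.2, List.range_succ, List.map_append, List.append_assoc]
    simp

def specList (matrix : List (List Int)) : List Bool :=
  (List.range (((PySem.List.pyGetD matrix 0 []).length : Int) - 2).toNat).map
    (fun p : Nat => decide ((wM matrix (p:Int)).toFinset.card = 9))

theorem Bspec_aux (matrix : List (List Int)) (n : Int) (hn3 : 3 ≤ n)
    (st0 : PySem.Dict Int Int × Int) (h : CInv (wM matrix 0) st0) :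
    ((PySem.List.pyRange 1 (n-2) 1).foldl (fun st pos =>
        let st1 := (PySem.List.pyRange 0 3 1).foldl (fun s i => bAdd s (mGet matrix i (pos+2))) (st.1, st.2.1)
        let st2 := (PySem.List.pyRange 0 3 1).foldl (fun s i => bDel s (mGet matrix i (pos-1))) st1
        (st2.1, st2.2, st.2.2 ++ [decide (st2.2 = 9)]))
      (st0.1, st0.2, [decide (st0.2 = 9)])).2.2
    = (List.range (n - 2).toNat).map
        (fun p : Nat => decide ((wM matrix (p:Int)).toFinset.card = 9)) := by
  obtain ⟨cnt0, dis0⟩ := st0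
  set m : Nat := (n - 3).toNat with hm
  have hmn : 1 + (m : Int) = n - 2 := by omega
  have hout := outerB matrix m cnt0 dis0 [decide (dis0 = 9)] h
  rw [hmn] at hout
  have hfun : (fun (st : PySem.Dict Int Int × Int × List Bool) (pos : Int) =>
      let st1 := (PySem.List.pyRange 0 3 1).foldl (fun s i => bAdd s (mGet matrix i (pos+2))) (st.1, st.2.1)
      let st2 := (PySem.List.pyRange 0 3 1).foldl (fun s i => bDel s (mGet matrix i (pos-1))) st1
      (st2.1, st2.2, st.2.2 ++ [decide (st2.2 = 9)])) = ostep matrix := by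
    funext st pos; rfl
  rw [hfun, hout.2]
  have hdis : dis0 = ((wM matrix 0).toFinset.card : Int) := h.2
  have hntwo : (n - 2).toNat = m + 1 := by omega
  rw [hntwo, List.range_succ_eq_map, List.map_cons, List.map_map]
  rw [hdis, cast_dec9, List.singleton_append]
  have hmap : List.map ((fun p : Nat => decide ((wM matrix (p:Int)).toFinset.card = 9)) ∘ Nat.succ) (List.range m)
      = List.map (fun t : Nat => decide ((wM matrix ((t:Int)+1)).toFinset.card = 9)) (List.range m) := by
    apply List.map_congr_left
    intro t _
    have hc : ((t+1 : Nat) : Int) = (t:Int)+1 := by push_cast; ring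
    simp only [Function.comp_apply, Nat.succ_eq_add_one, hc]
  rw [hmap]
  simp only [Nat.cast_zero]

theorem B_eq_spec (matrix : List (List Int)) : threeByN_alt matrix = specList matrix := by
  unfold threeByN_alt specList
  set n : Int := ((PySem.List.pyGetD matrix 0 []).length : Int) with hn
  have hn0 : 0 ≤ n := by positivity
  by_cases h3 : n < 3
  · rw [if_pos h3]
    have : (n - 2).toNat = 0 := by omega
    rw [this]
    simp
  · rw [if_neg h3]
    exact Bspec_aux matrix n (by omega) _ (initInv matrix)

theorem aWhile_eq_foldl (matrix : List (List Int)) (n i j : Int) (hj0 : 0 ≤ j) (hj2 : j ≤ 2) :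
    ∀ (fuel : Nat) (pos k : Int) (d : PySem.Dict Int (PySem.Set Int)),
      k = pos + j → (n - 2 - pos).toNat ≤ fuel →
      aWhile matrix n i j fuel pos k d
        = (PySem.List.pyRange pos (n-2) 1).foldl
            (fun d p => d.modify p [] (fun s => PySem.Set.add s (mGet matrix i (p + j)))) d := by
  intro fuel
  induction fuel with
  | zero =>
    intro pos k d hk hf
    rw [PySem.List.pyRange_one_eq_nil (by omega)]
    rfl
  | succ f ih =>
    intro pos k d hk hf
    by_cases hp : pos < n - 2
    · rw [PySem.List.pyRange_one_cons hp, List.foldl_cons]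
      show (if k < n ∧ pos < n - 2 then
          aWhile matrix n i j f (pos+1) (k+1)
            (PySem.Dict.modify d pos [] (fun s => PySem.Set.add s (mGet matrix i k)))
        else d) = _
      rw [if_pos ⟨by omega, hp⟩, hk]
      exact ih (pos+1) (pos+j+1) _ (by ring) (by omega)
    · rw [PySem.List.pyRange_one_eq_nil (by omega)]
      show (if k < n ∧ pos < n - 2 then _ else d) = d
      rw [if_neg (by rintro ⟨h1, h2⟩; omega)]

theorem getD_foldl_mod (f : Int → PySem.Set Int → PySem.Set Int) (p : Int) :
    ∀ (l : List Int) (d : PySem.Dict Int (PySem.Set Int)), l.Nodup →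
      ((l.foldl (fun d x => d.modify x [] (f x)) d).getD p [])
        = if p ∈ l then f p (d.getD p []) else d.getD p [] := by
  intro l
  induction l with
  | nil => simp
  | cons x t ih =>
    intro d hnd
    rw [List.foldl_cons, ih _ (List.nodup_cons.mp hnd).2]
    by_cases hpx : p = x
    · subst hpx
      have hpt : p ∉ t := (List.nodup_cons.mp hnd).1
      rw [if_neg hpt, if_pos (List.mem_cons_self ..), PySem.Dict.getD_modify, if_pos rfl]
    · rw [PySem.Dict.getD_modify, if_neg hpx]
      by_cases hpt : p ∈ t <;> simp [hpt, hpx, List.mem_cons]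

theorem update_self_of_subset (s xs : List Int) (h : ∀ y ∈ xs, y ∈ s) :
    PySem.Set.update s xs = s := by
  rw [PySem.Set.update_eq_append_filter]
  have hf : (PySem.Set.ofList xs).filter (fun y => !(PySem.Set.contains s y)) = [] := by
    apply List.filter_eq_nil_iff.mpr
    intro a ha
    have hax : a ∈ xs := (PySem.Set.mem_ofList xs a).mp ha
    simp
    exact h a hax
  rw [hf, List.append_nil]

def passD (matrix : List (List Int)) (n i j : Int) (d : PySem.Dict Int (PySem.Set Int)) :
    PySem.Dict Int (PySem.Set Int) :=
  (PySem.List.pyRange 0 (n-2) 1).foldl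
    (fun d p => d.modify p [] (fun s => PySem.Set.add s (mGet matrix i (p + j)))) d

theorem aWhile_passD (matrix : List (List Int)) (n i j : Int) (hj0 : 0 ≤ j) (hj2 : j ≤ 2)
    (d : PySem.Dict Int (PySem.Set Int)) :
    aWhile matrix n i j (n-2).toNat 0 j d = passD matrix n i j d :=
  aWhile_eq_foldl matrix n i j hj0 hj2 _ 0 j d (by ring) (by omega)

theorem keys_passD (matrix : List (List Int)) (n i j : Int) (d : PySem.Dict Int (PySem.Set Int)) :
    (passD matrix n i j d).keys = PySem.Set.update d.keys (PySem.List.pyRange 0 (n-2) 1) :=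
  PySem.Dict.keys_foldl_modify _ _ _ _

theorem getD_passD (matrix : List (List Int)) (n i j p : Int)
    (hp : p ∈ PySem.List.pyRange 0 (n-2) 1) (d : PySem.Dict Int (PySem.Set Int)) :
    (passD matrix n i j d).getD p [] = PySem.Set.add (d.getD p []) (mGet matrix i (p + j)) := by
  rw [passD, getD_foldl_mod _ _ _ _ (PySem.List.nodup_pyRange_one 0 (n-2)), if_pos hp]

def dictA (matrix : List (List Int)) (n : Int) : PySem.Dict Int (PySem.Set Int) :=
  passD matrix n 2 2 (passD matrix n 2 1 (passD matrix n 2 0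
    (passD matrix n 1 2 (passD matrix n 1 1 (passD matrix n 1 0
      (passD matrix n 0 2 (passD matrix n 0 1 (passD matrix n 0 0 PySem.Dict.empty))))))))

theorem keys_dictA (matrix : List (List Int)) (n : Int) :
    (dictA matrix n).keys = PySem.List.pyRange 0 (n-2) 1 := by
  have h0 : (passD matrix n 0 0 (PySem.Dict.empty : PySem.Dict Int (PySem.Set Int))).keys
      = PySem.List.pyRange 0 (n-2) 1 := by
    rw [keys_passD, PySem.Dict.keys_empty, PySem.Set.update_nil_left,
      PySem.Set.ofList_eq_self_of_nodup _ (PySem.List.nodup_pyRange_one 0 (n-2))]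
  unfold dictA
  rw [keys_passD, keys_passD, keys_passD, keys_passD, keys_passD, keys_passD, keys_passD,
    keys_passD, h0]
  rw [update_self_of_subset _ _ (fun y hy => hy), update_self_of_subset _ _ (fun y hy => hy),
    update_self_of_subset _ _ (fun y hy => hy), update_self_of_subset _ _ (fun y hy => hy),
    update_self_of_subset _ _ (fun y hy => hy), update_self_of_subset _ _ (fun y hy => hy),
    update_self_of_subset _ _ (fun y hy => hy), update_self_of_subset _ _ (fun y hy => hy)]

def winL (matrix : List (List Int)) (p : Int) : List Int :=
  [mGet matrix 0 p, mGet matrix 0 (p+1), mGet matrix 0 (p+2),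
   mGet matrix 1 p, mGet matrix 1 (p+1), mGet matrix 1 (p+2),
   mGet matrix 2 p, mGet matrix 2 (p+1), mGet matrix 2 (p+2)]

theorem getD_dictA (matrix : List (List Int)) (n p : Int)
    (hp : p ∈ PySem.List.pyRange 0 (n-2) 1) :
    (dictA matrix n).getD p [] = PySem.Set.ofList (winL matrix p) := by
  unfold dictA
  rw [getD_passD matrix n 2 2 p hp, getD_passD matrix n 2 1 p hp, getD_passD matrix n 2 0 p hp,
    getD_passD matrix n 1 2 p hp, getD_passD matrix n 1 1 p hp, getD_passD matrix n 1 0 p hp,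
    getD_passD matrix n 0 2 p hp, getD_passD matrix n 0 1 p hp, getD_passD matrix n 0 0 p hp,
    PySem.Dict.getD_empty]
  rw [PySem.Set.ofList_eq_foldl]
  simp only [winL, List.foldl_cons, List.foldl_nil, add_zero]

theorem ofList_len_card (L : List Int) :
    (PySem.Set.ofList L).length = (↑L : Multiset Int).toFinset.card := by
  rw [List.toFinset_coe]
  have h1 : L.toFinset = (PySem.Set.ofList L).toFinset := by
    ext u
    simp [List.mem_toFinset, PySem.Set.mem_ofList]
  rw [h1, List.toFinset_card_of_nodup (PySem.Set.nodup_ofList L)]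

theorem winL_wM (matrix : List (List Int)) (p : Int) :
    (↑(winL matrix p) : Multiset Int) = wM matrix p := by
  simp only [winL, wM, colM, ← Multiset.cons_coe, Multiset.coe_nil, ← Multiset.singleton_add]
  abel

theorem table_len (S : Int → PySem.Set Int) :
    ∀ (l : List Int) (t : List Bool),
      (l.foldl (fun t p => if (S p).length ≠ 9 then PySem.List.pySetD t p false else t) t).length
        = t.length := by
  intro l
  induction l with
  | nil => intro t; rfl
  | cons x l ih =>
    intro t
    rw [List.foldl_cons, ih]
    by_cases h : (S x).length ≠ 9
    · rw [if_pos h, PySem.List.length_pySetD]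
    · rw [if_neg h]

theorem table_get (S : Int → PySem.Set Int) :
    ∀ (l : List Int) (t : List Bool), (∀ x ∈ l, 0 ≤ x) → ∀ (q : Nat), q < t.length →
      (l.foldl (fun t p => if (S p).length ≠ 9 then PySem.List.pySetD t p false else t) t).getD q false
        = if ((q:Int) ∈ l ∧ (S (q:Int)).length ≠ 9) then false else t.getD q false := by
  intro l
  induction l with
  | nil => intro t _ q hq; simp
  | cons x l ih =>
    intro t hx q hq
    rw [List.foldl_cons]
    have hx0 : 0 ≤ x := hx x (List.mem_cons_self ..)
    have hlen : (if (S x).length ≠ 9 then PySem.List.pySetD t x false else t).length = t.length := by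
      by_cases h : (S x).length ≠ 9
      · rw [if_pos h, PySem.List.length_pySetD]
      · rw [if_neg h]
    rw [ih (if (S x).length ≠ 9 then PySem.List.pySetD t x false else t)
      (fun y hy => hx y (List.mem_cons_of_mem _ hy)) q (by omega)]
    by_cases hqx : (q:Int) = x
    · by_cases h9 : (S x).length ≠ 9
      · have ht'q : (if (S x).length ≠ 9 then PySem.List.pySetD t x false else t).getD q false
            = false := by
          rw [if_pos h9, PySem.List.pySetD_of_nonneg _ _ hx0, List.getD_eq_getElem _ _ (by
            simpa using hq), List.getElem_set, if_pos (by omega)]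
        rw [← hqx] at h9
        by_cases hql : (q:Int) ∈ l
        · rw [if_pos ⟨hql, h9⟩, if_pos ⟨List.mem_cons.mpr (Or.inr hql), h9⟩]
        · rw [if_neg (by tauto), ht'q, if_pos ⟨List.mem_cons.mpr (Or.inl hqx), h9⟩]
      · rw [if_neg h9]
        rw [← hqx] at h9
        rw [if_neg (by tauto), if_neg (by tauto)]
    · have ht'q : (if (S x).length ≠ 9 then PySem.List.pySetD t x false else t).getD q false
          = t.getD q false := by
        by_cases h9 : (S x).length ≠ 9
        · rw [if_pos h9, PySem.List.pySetD_of_nonneg _ _ hx0,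
            List.getD_eq_getElem _ _ (by simpa using hq), List.getElem_set, if_neg (by omega),
            List.getD_eq_getElem _ _ hq]
        · rw [if_neg h9]
      rw [ht'q]
      have hmem : ((q:Int) ∈ x :: l) ↔ ((q:Int) ∈ l) := by simp [List.mem_cons, hqx]
      by_cases hc : ((q:Int) ∈ l ∧ (S (q:Int)).length ≠ 9)
      · rw [if_pos hc, if_pos ⟨hmem.mpr hc.1, hc.2⟩]
      · rw [if_neg hc, if_neg (by rw [hmem]; exact hc)]

theorem Aspec_aux (matrix : List (List Int)) (n : Int) :
    (((PySem.List.pyRange 0 3 1).foldl (fun d i =>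
        (PySem.List.pyRange 0 3 1).foldl (fun d j => aWhile matrix n i j (n-2).toNat 0 j d) d)
      PySem.Dict.empty).items.foldl (fun table kv =>
        if kv.2.length ≠ 9 then PySem.List.pySetD table kv.1 false else table)
      (List.replicate (n-2).toNat true))
    = (List.range (n - 2).toNat).map
        (fun p : Nat => decide ((wM matrix (p:Int)).toFinset.card = 9)) := by
  rw [range3]
  simp only [List.foldl_cons, List.foldl_nil]
  rw [aWhile_passD matrix n 0 0 (by omega) (by omega) _,
    aWhile_passD matrix n 0 1 (by omega) (by omega) _,
    aWhile_passD matrix n 0 2 (by omega) (by omega) _,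
    aWhile_passD matrix n 1 0 (by omega) (by omega) _,
    aWhile_passD matrix n 1 1 (by omega) (by omega) _,
    aWhile_passD matrix n 1 2 (by omega) (by omega) _,
    aWhile_passD matrix n 2 0 (by omega) (by omega) _,
    aWhile_passD matrix n 2 1 (by omega) (by omega) _,
    aWhile_passD matrix n 2 2 (by omega) (by omega) _]
  show ((dictA matrix n).items.foldl (fun table kv =>
      if kv.2.length ≠ 9 then PySem.List.pySetD table kv.1 false else table)
    (List.replicate (n-2).toNat true)) = _
  have hnd : (dictA matrix n).keys.Nodup := by
    rw [keys_dictA]; exact PySem.List.nodup_pyRange_one 0 (n-2)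
  rw [PySem.Dict.items_eq_map_keys _ hnd [], keys_dictA, List.foldl_map]
  show ((PySem.List.pyRange 0 (n-2) 1).foldl (fun t p =>
      if ((dictA matrix n).getD p []).length ≠ 9 then PySem.List.pySetD t p false else t)
    (List.replicate (n-2).toNat true)) = _
  apply List.ext_getElem
  · rw [table_len]
    simp
  · intro q h1 h2
    have hqlen : q < (n-2).toNat := by
      rw [table_len] at h1
      simpa using h1
    have hq : q < (List.replicate (n-2).toNat true).length := by simpa using hqlen
    have hmem : ((q:Int)) ∈ PySem.List.pyRange 0 (n-2) 1 :=
      PySem.List.mem_pyRange_one.mpr ⟨by omega, by omega⟩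
    rw [← List.getD_eq_getElem _ false h1]
    rw [table_get (fun p => (dictA matrix n).getD p [])
      (PySem.List.pyRange 0 (n-2) 1) (List.replicate (n-2).toNat true)
      (fun x hxm => (PySem.List.mem_pyRange_one.mp hxm).1) q hq]
    rw [List.getElem_map, List.getElem_range]
    rw [getD_dictA matrix n _ hmem, ofList_len_card, winL_wM]
    have hrep : (List.replicate (n-2).toNat true).getD q false = true := by
      rw [List.getD_eq_getElem _ _ hq, List.getElem_replicate]
    by_cases h9 : (wM matrix (q:Int)).toFinset.card = 9
    · rw [if_neg (fun hcon => hcon.2 h9), hrep]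
      simp [h9]
    · rw [if_pos ⟨hmem, h9⟩]
      simp [h9]

theorem A_eq_spec (matrix : List (List Int)) : threeByN matrix = specList matrix :=
  Aspec_aux matrix _

theorem threeByN_main (matrix : List (List Int)) : threeByN matrix = threeByN_alt matrix :=
  (A_eq_spec matrix).trans (B_eq_spec matrix).symm

-- ===== VERDICT (by name: the statement is the Claim_ definition above) =====
theorem threeByN_spec : Claim_equal_threeByN := by
  intro m _ _
  unfold Spec_threeByN
  exact threeByN_main m
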